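-- pv_equiv track=rewrite | github.com/IwasakiLab/Evodictor | modules/CreateDataset.py | elemset2vec
-- ===== SOURCE A (Python) =====
-- def elemset2vec(
--     targetelem,
--     elemset,
--     predictor2elemlist,
--     predictor_list,
--     mode
--     ):
--
--     if ( mode == "define" ):
--
--         X = []
--
--         for predictor in predictor_list:
--
--             predictor_elemset = set(predictor2elemlist[predictor])
--
--             X.append( len(elemset & predictor_elemset) )
--
--     return X
-- ===== SOURCE B (Python) =====
-- def elemset2vec(
--     targetelem,
--     elemset,
--     predictor2elemlist,
--     predictor_list,
--     mode
--     ):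
--
--     # Inverted index: map each element to the predictor positions whose
--     # (deduped) element set contains it, then scatter +1 over those
--     # positions for every element of elemset.
--     if ( mode == "define" ):
--
--         index = {}
--
--         for i, predictor in enumerate(predictor_list):
--
--             for elem in set(predictor2elemlist[predictor]):
--
--                 index[elem] = index.get(elem, []) + [i]
--
--         X = [0] * len(predictor_list)
--
--         for elem in elemset:
--
--             for i in index.get(elem, []):
--
--                 X[i] += 1
--
--     return X
-- ===== Notes on version B (the rewrite author's own statement) =====
-- stated objective: alternative
-- what changed: Instead of intersecting a freshly built set per predictor, B builds an inverted index from each element to the predictor positions whose deduplicated element list contains it, initializes a zero vector, and scatters +1 into the indexed positions for every element of elemset.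
import Mathlib
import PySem

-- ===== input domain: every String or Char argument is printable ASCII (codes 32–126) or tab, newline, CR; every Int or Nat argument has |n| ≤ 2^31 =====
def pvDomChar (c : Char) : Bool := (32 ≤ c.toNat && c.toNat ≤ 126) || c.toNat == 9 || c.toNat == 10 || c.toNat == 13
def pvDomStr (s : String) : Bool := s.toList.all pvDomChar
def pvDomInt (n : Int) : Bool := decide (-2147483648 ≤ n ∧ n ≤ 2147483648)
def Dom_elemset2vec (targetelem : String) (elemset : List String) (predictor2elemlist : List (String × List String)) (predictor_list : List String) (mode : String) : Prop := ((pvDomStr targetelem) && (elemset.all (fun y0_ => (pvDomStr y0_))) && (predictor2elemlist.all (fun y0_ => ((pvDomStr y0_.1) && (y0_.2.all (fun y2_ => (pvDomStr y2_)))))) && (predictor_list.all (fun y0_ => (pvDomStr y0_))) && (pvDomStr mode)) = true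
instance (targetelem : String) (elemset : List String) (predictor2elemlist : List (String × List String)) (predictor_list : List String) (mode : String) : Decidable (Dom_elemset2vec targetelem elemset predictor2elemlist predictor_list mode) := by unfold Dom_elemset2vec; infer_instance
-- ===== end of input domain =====

-- B replaces A's per-predictor set intersections by an inverted index (element -> predictor
-- positions containing it) plus a scatter of +1 increments into a zero vector for each element of
-- elemset (alternative data structure, similar cost). A raises (UnboundLocalError / KeyError)
-- outside Pre_; nothing is claimed there.


-- ===== PORT A =====
-- `elemset` is a Python set: PySem.Set.ofList elemset is the set it denotes.
def elemset2vec (targetelem : String) (elemset : List String) (predictor2elemlist : List (String × List String)) (predictor_list : List String) (mode : String) : Option (List Int) :=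
  if mode = "define" then
    predictor_list.foldl (fun acc predictor =>
      match acc with
      | none => none
      | some X =>
        match (PySem.Dict.mk predictor2elemlist).get? predictor with
        | none => none   -- KeyError
        | some plist =>
          some (X ++ [PySem.Set.len (PySem.Set.inter (PySem.Set.ofList elemset) (PySem.Set.ofList plist))]))
      (some ([] : List Int))
  else none   -- UnboundLocalError

-- ===== PORT B =====
-- X[i] += 1; exact for 0 ≤ i < X.length, which holds for every position stored in the inverted index
def pvIncAt (X : List Int) (i : Int) : List Int := X.modify i.toNat (· + 1)

def elemset2vec_alt (targetelem : String) (elemset : List String) (predictor2elemlist : List (String × List String)) (predictor_list : List String) (mode : String) : Option (List Int) :=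
  if mode = "define" then
    match (PySem.List.enumerate predictor_list 0).foldl (fun acc ip =>
      match acc with
      | none => none
      | some idx =>
        match (PySem.Dict.mk predictor2elemlist).get? ip.2 with
        | none => none   -- KeyError
        | some plist =>
          some ((PySem.Set.ofList plist).foldl
            (fun d e => d.modify e [] (· ++ [ip.1])) idx))
      (some (PySem.Dict.empty : PySem.Dict String (List Int))) with
    | none => none
    | some idx =>
      some ((PySem.Set.ofList elemset).foldl
        (fun X e => (idx.getD e []).foldl pvIncAt X)
        (List.replicate predictor_list.length (0 : Int)))
  else none   -- UnboundLocalError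

-- ===== PRECONDITION & SPEC =====
-- Pre_ excludes exactly the inputs on which A raises: mode ≠ "define" (UnboundLocalError on `return X`)
-- and predictors missing from the dict (KeyError). A returns on every input satisfying Pre_.
def Pre_elemset2vec (targetelem : String) (elemset : List String) (predictor2elemlist : List (String × List String)) (predictor_list : List String) (mode : String) : Prop :=
  mode = "define" ∧ ∀ p ∈ predictor_list, (PySem.Dict.mk predictor2elemlist).contains p = true
instance (targetelem : String) (elemset : List String) (predictor2elemlist : List (String × List String)) (predictor_list : List String) (mode : String) : Decidable (Pre_elemset2vec targetelem elemset predictor2elemlist predictor_list mode) := by unfold Pre_elemset2vec; infer_instance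
def pvWitness_elemset2vec : String × List String × (List (String × List String)) × List String × String :=
  ("t", ["a"], [("p", ["a", "b"])], ["p"], "define")
def Spec_elemset2vec (targetelem : String) (elemset : List String) (predictor2elemlist : List (String × List String)) (predictor_list : List String) (mode : String) (out : Option (List Int)) : Prop := out = elemset2vec_alt targetelem elemset predictor2elemlist predictor_list mode
instance (targetelem : String) (elemset : List String) (predictor2elemlist : List (String × List String)) (predictor_list : List String) (mode : String) (out : Option (List Int)) : Decidable (Spec_elemset2vec targetelem elemset predictor2elemlist predictor_list mode out) := by unfold Spec_elemset2vec; infer_instance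

-- ===== CLAIM (what is proved, stated in full; the proofs are below) =====
def Claim_equal_elemset2vec : Prop := ∀ (targetelem : String) (elemset : List String) (predictor2elemlist : List (String × List String)) (predictor_list : List String) (mode : String), Dom_elemset2vec targetelem elemset predictor2elemlist predictor_list mode → Pre_elemset2vec targetelem elemset predictor2elemlist predictor_list mode → Spec_elemset2vec targetelem elemset predictor2elemlist predictor_list mode (elemset2vec targetelem elemset predictor2elemlist predictor_list mode)

-- ===== LEMMAS AND PROOFS =====

-- the intersection size A appends for a predictor whose dict entry is plist
def pvA (elemset plist : List String) : Int :=
  PySem.Set.len (PySem.Set.inter (PySem.Set.ofList elemset) (PySem.Set.ofList plist))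

-- A's Option fold, characterised under Pre_
theorem pvA_fold (elemset : List String) (d : PySem.Dict String (List String)) :
    ∀ (l : List String) (X : List Int), (∀ p ∈ l, d.contains p = true) →
    l.foldl (fun acc predictor =>
      match acc with
      | none => none
      | some X =>
        match d.get? predictor with
        | none => none
        | some plist => some (X ++ [pvA elemset plist])) (some X)
    = some (X ++ l.map (fun p => pvA elemset ((d.get? p).getD []))) := by
  intro l
  induction l with
  | nil => intro X _; simp
  | cons p l ih =>
    intro X hall
    have hp : d.contains p = true := hall p (by simp)
    have hne : d.get? p ≠ none := by
      intro h; rw [PySem.Dict.get?_eq_none_iff_contains] at h; simp [hp] at h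
    obtain ⟨v, hv⟩ := Option.ne_none_iff_exists'.mp hne
    simp only [List.foldl_cons, hv]
    rw [ih (X ++ [pvA elemset v]) (fun q hq => hall q (by simp [hq]))]
    simp [hv]

-- B's total inner index-building loop for one predictor position
def pvIdxStep (i : Int) (es : List String) (idx : PySem.Dict String (List Int)) : PySem.Dict String (List Int) :=
  es.foldl (fun d e => d.modify e [] (· ++ [i])) idx

-- B's total outer index-building loop
def pvBuild (d : PySem.Dict String (List String)) (PL : List (Int × String))
    (idx : PySem.Dict String (List Int)) : PySem.Dict String (List Int) :=
  PL.foldl (fun idx q => pvIdxStep q.1 (PySem.Set.ofList ((d.get? q.2).getD [])) idx) idx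

-- B's Option fold succeeds and equals the total loop under Pre_
theorem pvB_fold (d : PySem.Dict String (List String)) :
    ∀ (PL : List (Int × String)) (idx : PySem.Dict String (List Int)), (∀ q ∈ PL, d.contains q.2 = true) →
    PL.foldl (fun acc ip =>
      match acc with
      | none => none
      | some idx =>
        match d.get? ip.2 with
        | none => none
        | some plist =>
          some ((PySem.Set.ofList plist).foldl
            (fun d e => d.modify e [] (· ++ [ip.1])) idx)) (some idx)
    = some (pvBuild d PL idx) := by
  intro PL
  induction PL with
  | nil => intro idx _; simp [pvBuild]
  | cons q PL ih =>
    intro idx hall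
    have hp : d.contains q.2 = true := hall q (by simp)
    have hne : d.get? q.2 ≠ none := by
      intro h; rw [PySem.Dict.get?_eq_none_iff_contains] at h; simp [hp] at h
    obtain ⟨v, hv⟩ := Option.ne_none_iff_exists'.mp hne
    simp only [List.foldl_cons, hv]
    rw [ih _ (fun r hr => hall r (by simp [hr]))]
    simp [pvBuild, pvIdxStep, hv]

theorem pvIdxStep_getD (i : Int) :
    ∀ (es : List String) (idx : PySem.Dict String (List Int)) (e : String), es.Nodup →
    (pvIdxStep i es idx).getD e [] = idx.getD e [] ++ (if e ∈ es then [i] else []) := by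
  intro es
  induction es with
  | nil => intro idx e _; simp [pvIdxStep]
  | cons x xs ih =>
    intro idx e hnd
    have hstep : pvIdxStep i (x :: xs) idx = pvIdxStep i xs (idx.modify x [] (· ++ [i])) := rfl
    rw [hstep, ih _ e hnd.of_cons, PySem.Dict.getD_modify]
    by_cases hex : e = x
    · subst hex
      have hnx : e ∉ xs := (List.nodup_cons.mp hnd).1
      simp [hnx]
    · simp [hex]

theorem pvBuild_getD (d : PySem.Dict String (List String)) :
    ∀ (PL : List (Int × String)) (idx : PySem.Dict String (List Int)) (e : String),
    (pvBuild d PL idx).getD e []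
      = idx.getD e [] ++ ((PL.filter (fun q => decide (e ∈ PySem.Set.ofList ((d.get? q.2).getD [])))).map (·.1)) := by
  intro PL
  induction PL with
  | nil => intro idx e; simp [pvBuild]
  | cons q PL ih =>
    intro idx e
    have hstep : pvBuild d (q :: PL) idx
        = pvBuild d PL (pvIdxStep q.1 (PySem.Set.ofList ((d.get? q.2).getD [])) idx) := rfl
    rw [hstep, ih, pvIdxStep_getD _ _ _ _ (PySem.Set.nodup_ofList _)]
    by_cases he : e ∈ (d.get? q.2).getD []
    · simp [he, PySem.Set.mem_ofList, List.append_assoc]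
    · simp [he, PySem.Set.mem_ofList]

theorem pvIncFold_length : ∀ (ps : List Int) (X : List Int), (ps.foldl pvIncAt X).length = X.length := by
  intro ps
  induction ps with
  | nil => intro X; rfl
  | cons i ps ih => intro X; rw [List.foldl_cons, ih]; simp [pvIncAt]

theorem pvIncFold_getElem? :
    ∀ (ps : List Int) (X : List Int) (t : Nat) (ht : t < X.length), (∀ i ∈ ps, 0 ≤ i) →
    (ps.foldl pvIncAt X)[t]? = some (X[t] + (ps.count (t : Int) : Int)) := by
  intro ps
  induction ps with
  | nil => intro X t ht _; simp [List.getElem?_eq_getElem ht]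
  | cons i ps ih =>
    intro X t ht hpos
    have hi : 0 ≤ i := hpos i (by simp)
    have hlen : t < (pvIncAt X i).length := by simpa [pvIncAt] using ht
    rw [List.foldl_cons, ih (pvIncAt X i) t hlen (fun j hj => hpos j (by simp [hj]))]
    have hget : (pvIncAt X i)[t]'hlen = if i = (t : Int) then X[t] + 1 else X[t] := by
      unfold pvIncAt
      rw [List.getElem_modify]
      by_cases h : i = (t : Int)
      · rw [if_pos h, if_pos (by omega)]
      · rw [if_neg h, if_neg (by omega)]
    rw [hget, List.count_cons]
    by_cases h : i = (t : Int)
    · simp only [h, beq_self_eq_true, if_true, Option.some.injEq]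
      push_cast
      ring
    · have hb : (i == (t : Int)) = false := by simpa using h
      simp [h, hb]

theorem pvScatter_length (idx : PySem.Dict String (List Int)) :
    ∀ (es : List String) (X : List Int),
    (es.foldl (fun X e => (idx.getD e []).foldl pvIncAt X) X).length = X.length := by
  intro es
  induction es with
  | nil => intro X; rfl
  | cons e es ih => intro X; rw [List.foldl_cons, ih, pvIncFold_length]

-- the scatter loop over the elements of elemset
theorem pvScatter_getElem? (idx : PySem.Dict String (List Int)) :
    ∀ (es : List String) (X : List Int) (t : Nat) (ht : t < X.length),
    (∀ e i, i ∈ idx.getD e [] → 0 ≤ i) →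
    (es.foldl (fun X e => (idx.getD e []).foldl pvIncAt X) X)[t]?
      = some (X[t] + (es.map (fun e => ((idx.getD e []).count (t : Int) : Int))).sum) := by
  intro es
  induction es with
  | nil => intro X t ht _; simp [List.getElem?_eq_getElem ht]
  | cons e es ih =>
    intro X t ht hpos
    have hlen : t < ((idx.getD e []).foldl pvIncAt X).length := by
      rw [pvIncFold_length]; exact ht
    rw [List.foldl_cons, ih _ t hlen hpos]
    have := pvIncFold_getElem? (idx.getD e []) X t ht (fun i hi => hpos e i hi)
    rw [List.getElem?_eq_getElem hlen] at this
    rw [Option.some.inj this]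
    simp only [List.map_cons, List.sum_cons, Option.some.injEq]
    ring

-- count of a position in the mapped-filtered enumerate vanishes below the start index
theorem pvEnumCount_zero (P : Int × String → Bool) :
    ∀ (l : List String) (s j : Int), j < s →
    (((PySem.List.enumerate l s).filter P).map (·.1)).count j = 0 := by
  intro l
  induction l with
  | nil => intro s j _; simp [PySem.List.enumerate_nil]
  | cons x xs ih =>
    intro s j hj
    rw [PySem.List.enumerate_cons]
    by_cases hP : P (s, x) = true
    · rw [List.filter_cons_of_pos hP]
      simp only [List.map_cons, List.count_cons]
      rw [ih (s + 1) j (by omega)]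
      have : (s == j) = false := by simpa using (by omega : s ≠ j)
      simp [this]
    · rw [List.filter_cons_of_neg (by simp [hP])]
      exact ih (s + 1) j (by omega)

-- count of a position in the mapped-filtered enumerate picks out exactly that predictor
theorem pvEnumCount (P : Int × String → Bool) :
    ∀ (l : List String) (s : Int) (t : Nat) (ht : t < l.length),
    ((((PySem.List.enumerate l s).filter P).map (·.1)).count (s + (t : Int)) : Int)
      = if P (s + (t : Int), l[t]) = true then 1 else 0 := by
  intro l
  induction l with
  | nil => intro s t ht; simp at ht
  | cons x xs ih =>
    intro s t ht
    rw [PySem.List.enumerate_cons]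
    cases t with
    | zero =>
      have hz : (((PySem.List.enumerate xs (s + 1)).filter P).map (·.1)).count (s + ((0 : Nat) : Int)) = 0 :=
        pvEnumCount_zero P xs (s + 1) _ (by push_cast; omega)
      by_cases hP : P (s, x) = true
      · rw [List.filter_cons_of_pos hP]
        simp only [List.map_cons, List.count_cons]
        rw [hz]
        have : P (s + ((0 : Nat) : Int), (x :: xs)[0]) = true := by simpa using hP
        rw [if_pos this]
        simp
      · rw [List.filter_cons_of_neg (by simp [hP])]
        rw [hz]
        have : ¬ P (s + ((0 : Nat) : Int), (x :: xs)[0]) = true := by simpa using hP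
        rw [if_neg this]
        simp
    | succ t =>
      have hne : (s + ((t + 1 : Nat) : Int)) ≠ s := by push_cast; omega
      have hrw : s + ((t + 1 : Nat) : Int) = (s + 1) + (t : Int) := by push_cast; ring
      have hg : (x :: xs)[t + 1] = xs[t]'(by simpa using ht) := by simp
      by_cases hP : P (s, x) = true
      · rw [List.filter_cons_of_pos hP]
        simp only [List.map_cons, List.count_cons]
        have hb : ((s : Int) == s + ((t + 1 : Nat) : Int)) = false := by
          simpa using (by push_cast; omega : (s : Int) ≠ s + ((t + 1 : Nat) : Int))
        rw [hb, hrw, hg]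
        simpa using ih (s + 1) t (by simpa using ht)
      · rw [List.filter_cons_of_neg (by simp [hP])]
        rw [hrw, hg]
        exact ih (s + 1) t (by simpa using ht)

-- sum of 0/1 indicators is a countP
theorem pvSumIf {α : Type} (p : α → Bool) :
    ∀ (l : List α), (l.map (fun e => if p e = true then (1 : Int) else 0)).sum = (l.countP p : Int) := by
  intro l
  induction l with
  | nil => simp
  | cons x xs ih =>
    simp only [List.map_cons, List.sum_cons, List.countP_cons, ih]
    by_cases h : p x = true
    · simp [h]; ring
    · simp [h]

-- A's intersection size as a countP over the element set
theorem pvA_eq_countP (elemset plist : List String) :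
    pvA elemset plist
      = ((PySem.Set.ofList elemset).countP (fun e => decide (e ∈ PySem.Set.ofList plist)) : Int) := by
  unfold pvA
  simp only [PySem.Set.len, PySem.Set.inter, ← List.countP_eq_length_filter]
  congr 1
  apply List.countP_congr
  intro x _
  simp

-- ===== VERDICT (by name: the statement is the Claim_ definition above) =====
theorem elemset2vec_spec : Claim_equal_elemset2vec := by
  intro targetelem elemset predictor2elemlist predictor_list mode _ hpre
  obtain ⟨hmode, hall⟩ := hpre
  subst hmode
  unfold Spec_elemset2vec elemset2vec elemset2vec_alt
  rw [if_pos rfl, if_pos rfl]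
  have hA := pvA_fold elemset (PySem.Dict.mk predictor2elemlist) predictor_list [] hall
  simp only [pvA] at hA
  rw [hA]
  have hallE : ∀ q ∈ PySem.List.enumerate predictor_list 0,
      (PySem.Dict.mk predictor2elemlist).contains q.2 = true := by
    intro q hq
    rw [PySem.List.mem_enumerate_iff] at hq
    obtain ⟨k, hk, rfl⟩ := hq
    exact hall _ (by simp)
  have hB := pvB_fold (PySem.Dict.mk predictor2elemlist)
      (PySem.List.enumerate predictor_list 0) PySem.Dict.empty hallE
  rw [hB]
  simp only [List.nil_append, Option.some.injEq]
  set d := PySem.Dict.mk predictor2elemlist with hd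
  set idx := pvBuild d (PySem.List.enumerate predictor_list 0) PySem.Dict.empty with hidx
  have hgetD : ∀ e, idx.getD e []
      = ((PySem.List.enumerate predictor_list 0).filter
          (fun q => decide (e ∈ PySem.Set.ofList ((d.get? q.2).getD [])))).map (·.1) := by
    intro e
    rw [hidx, pvBuild_getD]
    simp
  have hpos : ∀ e i, i ∈ idx.getD e [] → 0 ≤ i := by
    intro e i hi
    rw [hgetD] at hi
    simp only [List.mem_map, List.mem_filter] at hi
    obtain ⟨q, ⟨hq, _⟩, rfl⟩ := hi
    rw [PySem.List.mem_enumerate_iff] at hq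
    obtain ⟨k, hk, rfl⟩ := hq
    simp
  apply List.ext_getElem
  · rw [List.length_map, pvScatter_length, List.length_replicate]
  · intro t h1 h2
    rw [List.getElem_map]
    have hs := pvScatter_getElem? idx (PySem.Set.ofList elemset)
        (List.replicate predictor_list.length (0 : Int)) t
        (by rw [List.length_replicate]; simpa using h1) hpos
    rw [List.getElem?_eq_getElem h2] at hs
    rw [Option.some.inj hs, List.getElem_replicate]
    have hcnt : ∀ e, ((idx.getD e []).count (t : Int) : Int)
        = if decide (e ∈ PySem.Set.ofList (((d.get? (predictor_list[t]'(by simpa using h1))).getD []))) = true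
          then (1 : Int) else 0 := by
      intro e
      rw [hgetD]
      have h0 : ((t : Nat) : Int) = 0 + ((t : Nat) : Int) := by omega
      rw [h0, pvEnumCount _ predictor_list 0 t (by simpa using h1)]
    rw [List.map_congr_left (fun e _ => hcnt e)]
    rw [pvSumIf]
    rw [← pvA_eq_countP]
    simp [pvA]
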